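-- pv_equiv track=rewrite | github.com/avidLearnerInProgress/leetcode-solutions | cinema_seat_allocation.py | maxNumberOfFamilies
-- ===== SOURCE A (Python) =====
-- def maxNumberOfFamilies(n, reservedSeats):
--     reservedSeats.sort()
--     rst = 0
--     idx = 0
--     row_count = 0
--     while idx < len(reservedSeats):
--         cur_row = reservedSeats[idx][0]
--         l_valid = mid_valid = r_valid = True
--         while idx < len(reservedSeats) and reservedSeats[idx][0] == cur_row:
--             if 2 <= reservedSeats[idx][1] <= 3:
--                 l_valid = False
--             elif 4 <= reservedSeats[idx][1] <= 7:
--                 mid_valid = False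
--                 if reservedSeats[idx][1] <= 5:
--                     l_valid = False
--                 if reservedSeats[idx][1] >= 6:
--                     r_valid = False
--             elif 8 <= reservedSeats[idx][1] <= 9:
--                 r_valid = False
--             idx += 1
--         # both valid, maximum family number is 2
--         if l_valid and r_valid:
--             rst += 2
--         # either one valid, maximum family number is 1
--         elif l_valid or r_valid or mid_valid:
--             rst += 1
--         row_count += 1
--     # add no reserved seat rows
--     return rst + (n - row_count) * 2
-- ===== SOURCE B (Python) =====
-- def maxNumberOfFamilies(n, reservedSeats):
--     rows = {}
--     for seat in reservedSeats:
--         row, col = seat[0], seat[1]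
--         l, m, r = rows.get(row, (True, True, True))
--         if 2 <= col <= 5:
--             l = False
--         if 4 <= col <= 7:
--             m = False
--         if 6 <= col <= 9:
--             r = False
--         rows[row] = (l, m, r)
--     total = 2 * (n - len(rows))
--     for l, m, r in rows.values():
--         if l and r:
--             total += 2
--         elif l or m or r:
--             total += 1
--     return total
-- ===== Notes on version B (the rewrite author's own statement) =====
-- stated objective: alternative
-- what changed: replaces sort + grouped index-walk over consecutive equal rows by a single pass that accumulates per-row (left,mid,right) availability flags in a dict, then sums scores over the dict values
import Mathlib
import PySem

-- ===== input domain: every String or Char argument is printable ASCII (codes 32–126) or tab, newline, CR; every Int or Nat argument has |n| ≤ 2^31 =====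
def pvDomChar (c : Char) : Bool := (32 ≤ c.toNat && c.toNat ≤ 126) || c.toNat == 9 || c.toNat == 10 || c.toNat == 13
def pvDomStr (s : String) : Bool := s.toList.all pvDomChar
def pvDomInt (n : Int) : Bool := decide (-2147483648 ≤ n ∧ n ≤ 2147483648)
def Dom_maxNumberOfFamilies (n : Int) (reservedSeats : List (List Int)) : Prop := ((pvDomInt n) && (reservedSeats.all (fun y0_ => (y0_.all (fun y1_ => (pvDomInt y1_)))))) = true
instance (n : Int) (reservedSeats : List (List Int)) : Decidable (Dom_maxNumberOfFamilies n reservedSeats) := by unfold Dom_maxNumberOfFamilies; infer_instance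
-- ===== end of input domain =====

-- B replaces A's sort + index-walk over runs of equal rows by one dict-building pass plus a
-- sum over the dict's values (objective: alternative, no sort needed).  A sorts its argument IN PLACE
-- (reservedSeats.sort()); B does not mutate: the equivalence proved here is about the
-- RETURN value only.

-- ===== PORT A =====
-- the flag updates of A's inner while body (elif chain, in A's order)
def pvAUpd (c : Int) (l m r : Bool) : Bool × Bool × Bool :=
  if 2 ≤ c ∧ c ≤ 3 then (false, m, r)
  else if 4 ≤ c ∧ c ≤ 7 then
    ((if c ≤ 5 then false else l), false, (if 6 ≤ c then false else r))
  else if 8 ≤ c ∧ c ≤ 9 then (l, m, false)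
  else (l, m, r)

-- the rst update at the end of A's outer while body (if/elif, in A's order)
def pvAClose (l m r : Bool) (rst : Int) : Int :=
  if l && r then rst + 2 else if l || r || m then rst + 1 else rst

-- A's two nested whiles, fused into one structural pass over the sorted list: the state is
-- (cur_row, the three flags, rst, row_count); the branch on reservedSeats[idx][0] == cur_row
-- either continues the current run or closes it and opens the next one, exactly as A does
def pvALoop : List (List Int) → Int → Bool → Bool → Bool → Int → Int → Int × Int
  | [], _, l, m, r, rst, rc => (pvAClose l m r rst, rc + 1)
  | s :: rest, cur, l, m, r, rst, rc =>
    if PySem.List.pyGetD s 0 0 = cur then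
      let f := pvAUpd (PySem.List.pyGetD s 1 0) l m r
      pvALoop rest cur f.1 f.2.1 f.2.2 rst rc
    else
      let f := pvAUpd (PySem.List.pyGetD s 1 0) true true true
      pvALoop rest (PySem.List.pyGetD s 0 0) f.1 f.2.1 f.2.2 (pvAClose l m r rst) (rc + 1)

-- A after the sort: the outer while (skipped entirely on an empty list) and the final return
def pvARun (n : Int) (ss : List (List Int)) : Int :=
  match ss with
  | [] => 0 + (n - 0) * 2
  | s :: rest =>
    let f := pvAUpd (PySem.List.pyGetD s 1 0) true true true
    let p := pvALoop rest (PySem.List.pyGetD s 0 0) f.1 f.2.1 f.2.2 0 0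
    p.1 + (n - p.2) * 2

def maxNumberOfFamilies (n : Int) (reservedSeats : List (List Int)) : Int :=
  -- reservedSeats.sort(): Python's list comparison is the lexicographic order on List Int
  pvARun n (@PySem.List.sorted (List Int) (List Int) LinearOrder.toPartialOrder.toLT
      LinearOrder.toDecidableLT reservedSeats (fun x => x) false)

-- ===== PORT B =====
-- B's per-seat flag update: three independent ifs on the simplified ranges
def pvBUpd (c : Int) (f : Bool × Bool × Bool) : Bool × Bool × Bool :=
  let l := if 2 ≤ c ∧ c ≤ 5 then false else f.1
  let m := if 4 ≤ c ∧ c ≤ 7 then false else f.2.1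
  let r := if 6 ≤ c ∧ c ≤ 9 then false else f.2.2
  (l, m, r)

-- B's per-row contribution
def pvBScore (f : Bool × Bool × Bool) : Int :=
  if f.1 && f.2.2 then 2 else if f.1 || f.2.1 || f.2.2 then 1 else 0

def maxNumberOfFamilies_alt (n : Int) (reservedSeats : List (List Int)) : Int :=
  let d := reservedSeats.foldl
    (fun d s => d.modify (PySem.List.pyGetD s 0 0) (true, true, true)
      (pvBUpd (PySem.List.pyGetD s 1 0))) (PySem.Dict.empty)
  d.values.foldl (fun t f => t + pvBScore f) (2 * (n - d.size))

-- ===== PRECONDITION & SPEC =====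
-- Pre_ excludes exactly the inputs on which Python A raises IndexError:
-- a reserved seat with fewer than two entries (A reads seat[0] and seat[1]).
def Pre_maxNumberOfFamilies (n : Int) (reservedSeats : List (List Int)) : Prop :=
  ∀ s ∈ reservedSeats, 2 ≤ s.length
instance (n : Int) (reservedSeats : List (List Int)) : Decidable (Pre_maxNumberOfFamilies n reservedSeats) := by unfold Pre_maxNumberOfFamilies; infer_instance

def pvWitness_maxNumberOfFamilies : Int × List (List Int) := (3, [[1, 2], [1, 3], [2, 7]])

def Spec_maxNumberOfFamilies (n : Int) (reservedSeats : List (List Int)) (out : Int) : Prop := out = maxNumberOfFamilies_alt n reservedSeats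
instance (n : Int) (reservedSeats : List (List Int)) (out : Int) : Decidable (Spec_maxNumberOfFamilies n reservedSeats out) := by unfold Spec_maxNumberOfFamilies; infer_instance

-- ===== CLAIM (what is proved, stated in full; the proofs are below) =====
def Claim_equal_maxNumberOfFamilies : Prop := ∀ (n : Int) (reservedSeats : List (List Int)), Dom_maxNumberOfFamilies n reservedSeats → Pre_maxNumberOfFamilies n reservedSeats → Spec_maxNumberOfFamilies n reservedSeats (maxNumberOfFamilies n reservedSeats)

-- ===== LEMMAS AND PROOFS =====

-- abbreviations for the proofs: row and column of a seat, flag fold, per-row score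
def pvRowF (s : List Int) : Int := PySem.List.pyGetD s 0 0
def pvColF (s : List Int) : Int := PySem.List.pyGetD s 1 0
def pvFold (L : List (List Int)) (f : Bool × Bool × Bool) : Bool × Bool × Bool :=
  L.foldl (fun acc s => pvBUpd (pvColF s) acc) f
def pvScoreRow (xs : List (List Int)) (r : Int) : Int :=
  pvBScore (pvFold (xs.filter (fun s => pvRowF s == r)) (true, true, true))

-- A's elif chain and B's three ifs update the flags identically
theorem pvAUpd_eq (c : Int) (f : Bool × Bool × Bool) :
    pvAUpd c f.1 f.2.1 f.2.2 = pvBUpd c f := by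
  obtain ⟨l, m, r⟩ := f
  simp only [pvAUpd, pvBUpd]
  split_ifs <;> simp_all <;> omega

-- A's closing if/elif adds exactly B's score
theorem pvAClose_eq (f : Bool × Bool × Bool) (rst : Int) :
    pvAClose f.1 f.2.1 f.2.2 rst = rst + pvBScore f := by
  obtain ⟨l, m, r⟩ := f
  cases l <;> cases m <;> cases r <;> simp [pvAClose, pvBScore]

theorem pvBUpd_char (c : Int) (f : Bool × Bool × Bool) :
    pvBUpd c f = (f.1 && !decide (2 ≤ c ∧ c ≤ 5), f.2.1 && !decide (4 ≤ c ∧ c ≤ 7),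
                  f.2.2 && !decide (6 ≤ c ∧ c ≤ 9)) := by
  obtain ⟨l, m, r⟩ := f
  simp only [pvBUpd]
  split_ifs <;> simp_all <;> omega

-- the flag fold only records which column ranges occur, hence is permutation-invariant
theorem pvFold_char (L : List (List Int)) (f : Bool × Bool × Bool) :
    pvFold L f = (f.1 && !(L.any fun s => decide (2 ≤ pvColF s ∧ pvColF s ≤ 5)),
                  f.2.1 && !(L.any fun s => decide (4 ≤ pvColF s ∧ pvColF s ≤ 7)),
                  f.2.2 && !(L.any fun s => decide (6 ≤ pvColF s ∧ pvColF s ≤ 9))) := by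
  induction L generalizing f with
  | nil => simp [pvFold]
  | cons s t ih =>
    rw [pvFold, List.foldl_cons, ← pvFold, ih, pvBUpd_char]
    simp only [List.any_cons, Bool.not_or, Bool.and_assoc, Bool.decide_and]

theorem pvFold_perm {L L' : List (List Int)} (h : L.Perm L') (f : Bool × Bool × Bool) :
    pvFold L f = pvFold L' f := by
  rw [pvFold_char, pvFold_char, h.any_eq, h.any_eq, h.any_eq]

theorem pvScoreRow_perm {xs ys : List (List Int)} (h : xs.Perm ys) (r : Int) :
    pvScoreRow xs r = pvScoreRow ys r := by
  unfold pvScoreRow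
  rw [pvFold_perm (h.filter _)]

theorem pvScoreRow_cons_ne (s : List Int) (t : List (List Int)) (r : Int)
    (h : pvRowF s ≠ r) : pvScoreRow (s :: t) r = pvScoreRow t r := by
  simp [pvScoreRow, h]

theorem pvScoreRow_cons_self (s : List Int) (t : List (List Int)) :
    pvScoreRow (s :: t) (pvRowF s)
      = pvBScore (pvFold (t.filter (fun u => pvRowF u == pvRowF s)) (pvBUpd (pvColF s) (true, true, true))) := by
  simp [pvScoreRow, pvFold]

-- the fused loop, on a list whose rows are all ≥ cur and nondecreasing, closes the current
-- run and then contributes one score and one row_count per further distinct row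
theorem pvALoop_eq (xs : List (List Int)) (cur : Int) (f : Bool × Bool × Bool)
    (rst rc : Int) (ks : List Int)
    (hmono : xs.Pairwise (fun a b => pvRowF a ≤ pvRowF b))
    (hge : ∀ u ∈ xs, cur ≤ pvRowF u)
    (hnd : ks.Nodup)
    (hks : ∀ r, r ∈ ks ↔ (r ∈ xs.map pvRowF ∧ r ≠ cur)) :
    pvALoop xs cur f.1 f.2.1 f.2.2 rst rc
      = (rst + pvBScore (pvFold (xs.filter (fun s => pvRowF s == cur)) f)
           + (ks.map (pvScoreRow xs)).sum,
         rc + 1 + (ks.length : Int)) := by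
  induction xs generalizing cur f rst rc ks with
  | nil =>
    have hk : ks = [] := List.eq_nil_iff_forall_not_mem.mpr (fun r hr => by
      rcases (hks r).mp hr with ⟨h, _⟩; simp at h)
    subst hk
    simp [pvALoop, pvAClose_eq, pvFold]
  | cons s rest ih =>
    have hm1 : ∀ u ∈ rest, pvRowF s ≤ pvRowF u := (List.pairwise_cons.mp hmono).1
    have hmr : rest.Pairwise (fun a b => pvRowF a ≤ pvRowF b) := (List.pairwise_cons.mp hmono).2
    by_cases h : pvRowF s = cur
    · -- same row: continue the current run
      have hstep : pvALoop (s :: rest) cur f.1 f.2.1 f.2.2 rst rc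
          = pvALoop rest cur (pvBUpd (pvColF s) f).1 (pvBUpd (pvColF s) f).2.1
              (pvBUpd (pvColF s) f).2.2 rst rc := by
        simp only [pvALoop]
        rw [if_pos (show PySem.List.pyGetD s 0 0 = cur from h),
          show pvAUpd (PySem.List.pyGetD s 1 0) f.1 f.2.1 f.2.2 = pvBUpd (pvColF s) f
            from pvAUpd_eq _ f]
      rw [hstep, ih cur (pvBUpd (pvColF s) f) rst rc ks hmr
        (fun u hu => h ▸ hm1 u hu) hnd (fun r => by
          rw [hks r]
          simp only [List.map_cons, List.mem_cons, h]
          constructor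
          · rintro ⟨hc | hm, hne⟩
            · exact absurd hc hne
            · exact ⟨hm, hne⟩
          · exact fun ⟨hm, hne⟩ => ⟨Or.inr hm, hne⟩)]
      have hfil : (s :: rest).filter (fun u => pvRowF u == cur)
          = s :: rest.filter (fun u => pvRowF u == cur) := by
        rw [List.filter_cons_of_pos (by simp [h])]
      rw [hfil]
      have hfold : pvFold (s :: rest.filter (fun u => pvRowF u == cur)) f
          = pvFold (rest.filter (fun u => pvRowF u == cur)) (pvBUpd (pvColF s) f) := rfl
      rw [hfold, List.map_congr_left (fun r hr => pvScoreRow_cons_ne s rest r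
        (fun e => ((hks r).mp hr).2 (e ▸ h)))]
    · -- new row: close the run, open a new one at pvRowF s
      have hlt : cur < pvRowF s := lt_of_le_of_ne (hge s (by simp)) (fun e => h e.symm)
      have hrne : ∀ u ∈ rest, pvRowF u ≠ cur :=
        fun u hu => ne_of_gt (lt_of_lt_of_le hlt (hm1 u hu))
      have hsmem : pvRowF s ∈ ks := (hks _).mpr ⟨by simp, h⟩
      have hnd' : (ks.erase (pvRowF s)).Nodup := hnd.erase _
      have hks' : ∀ r, r ∈ ks.erase (pvRowF s) ↔ (r ∈ rest.map pvRowF ∧ r ≠ pvRowF s) := by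
        intro r
        rw [List.Nodup.mem_erase_iff hnd, hks r, List.map_cons, List.mem_cons]
        constructor
        · rintro ⟨hne, hc2 | hm', _⟩
          · exact absurd hc2 hne
          · exact ⟨hm', hne⟩
        · rintro ⟨hm', hne⟩
          rcases List.mem_map.mp hm' with ⟨u, hu, rfl⟩
          exact ⟨hne, Or.inr hm', hrne u hu⟩
      have hstep : pvALoop (s :: rest) cur f.1 f.2.1 f.2.2 rst rc
          = pvALoop rest (pvRowF s) (pvBUpd (pvColF s) (true, true, true)).1
              (pvBUpd (pvColF s) (true, true, true)).2.1 (pvBUpd (pvColF s) (true, true, true)).2.2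
              (pvAClose f.1 f.2.1 f.2.2 rst) (rc + 1) := by
        simp only [pvALoop]
        rw [if_neg (show ¬ PySem.List.pyGetD s 0 0 = cur from h),
          show pvAUpd (PySem.List.pyGetD s 1 0) true true true
              = pvBUpd (pvColF s) (true, true, true) from pvAUpd_eq _ (true, true, true)]
        rfl
      rw [hstep, ih (pvRowF s) (pvBUpd (pvColF s) (true, true, true))
        (pvAClose f.1 f.2.1 f.2.2 rst) (rc + 1) (ks.erase (pvRowF s)) hmr hm1 hnd' hks']
      have hfil0 : (s :: rest).filter (fun u => pvRowF u == cur) = [] := by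
        rw [List.filter_cons_of_neg (by simp [h])]
        exact List.filter_eq_nil_iff.mpr (fun u hu => by simp [hrne u hu])
      have hperm : ks.Perm (pvRowF s :: ks.erase (pvRowF s)) := List.perm_cons_erase hsmem
      have hsum : (ks.map (pvScoreRow (s :: rest))).sum
          = pvScoreRow (s :: rest) (pvRowF s)
            + ((ks.erase (pvRowF s)).map (pvScoreRow (s :: rest))).sum := by
        rw [(hperm.map (pvScoreRow (s :: rest))).sum_eq, List.map_cons, List.sum_cons]
      have hmapeq : ((ks.erase (pvRowF s)).map (pvScoreRow rest)).sum
          = ((ks.erase (pvRowF s)).map (pvScoreRow (s :: rest))).sum := by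
        rw [List.map_congr_left (fun r hr => (pvScoreRow_cons_ne s rest r
          (fun e => ((hks' r).mp hr).2 e.symm)).symm)]
      have hlen : (ks.length : Int) = (ks.erase (pvRowF s)).length + 1 := by
        rw [hperm.length_eq]; push_cast [List.length_cons]; ring
      rw [hfil0, hsum, hmapeq, pvAClose_eq, pvScoreRow_cons_self, hlen]
      simp only [pvFold, List.foldl_nil, Prod.mk.injEq]
      constructor <;> ring

-- B's dict lookup after the building fold is the flag fold over the seats of that row
theorem pvGetD_fold (l : List (List Int)) (d0 : PySem.Dict Int (Bool × Bool × Bool)) (r : Int) :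
    (l.foldl (fun d s => d.modify (PySem.List.pyGetD s 0 0) (true, true, true)
        (pvBUpd (PySem.List.pyGetD s 1 0))) d0).getD r (true, true, true)
      = pvFold (l.filter (fun s => pvRowF s == r)) (d0.getD r (true, true, true)) := by
  induction l generalizing d0 with
  | nil => simp [pvFold]
  | cons s t ih =>
    rw [List.foldl_cons, ih]
    by_cases h : pvRowF s = r
    · subst h
      rw [List.filter_cons_of_pos (by simp),
        show (PySem.List.pyGetD s 0 0) = pvRowF s from rfl, PySem.Dict.getD_modify_self]
      rfl
    · rw [PySem.Dict.getD_modify_of_ne]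
      · simp [h]
      · exact fun hc => h hc.symm

-- the first component of a lexicographically smaller nonempty list is not larger
theorem pvRow_le_of_le {a b : List Int} (ha : a ≠ []) (hb : b ≠ []) (hle : a ≤ b) :
    pvRowF a ≤ pvRowF b := by
  obtain ⟨x, as, rfl⟩ := List.exists_cons_of_ne_nil ha
  obtain ⟨y, bs, rfl⟩ := List.exists_cons_of_ne_nil hb
  simp only [pvRowF, PySem.List.pyGetD_zero_cons]
  by_contra hxy
  exact absurd (lt_of_lt_of_le (List.Lex.rel (not_le.mp hxy) : (y :: bs) < (x :: as)) hle)
    (lt_irrefl _)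

-- ===== VERDICT (by name: the statement is the Claim_ definition above) =====
theorem maxNumberOfFamilies_spec : Claim_equal_maxNumberOfFamilies := by
  intro n seats _ hpre
  unfold Spec_maxNumberOfFamilies
  -- B's dict
  set d := seats.foldl
    (fun d s => d.modify (PySem.List.pyGetD s 0 0) (true, true, true)
      (pvBUpd (PySem.List.pyGetD s 1 0))) (PySem.Dict.empty) with hd
  have hBnd : d.keys.Nodup := by
    rw [hd]
    exact PySem.Dict.nodup_keys_foldl_modify_key seats (fun s => PySem.List.pyGetD s 0 0)
      (true, true, true) (fun _ s => pvBUpd (PySem.List.pyGetD s 1 0)) PySem.Dict.empty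
      PySem.Dict.nodup_keys_empty
  have hBmem : ∀ r, r ∈ d.keys ↔ r ∈ seats.map pvRowF := by
    intro r
    rw [hd, PySem.Dict.keys_foldl_modify_key, PySem.Dict.keys_empty]
    simp [pysem, pvRowF, eq_comm]
  have hBget : ∀ r, d.getD r (true, true, true)
      = pvFold (seats.filter (fun s => pvRowF s == r)) (true, true, true) := by
    intro r
    rw [hd, pvGetD_fold, PySem.Dict.getD_empty]
  have hBsize : d.size = (d.keys.length : Int) := by
    simp [PySem.Dict.size, PySem.Dict.keys]
  have hBval : maxNumberOfFamilies_alt n seats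
      = 2 * (n - (d.keys.length : Int)) + (d.keys.map (pvScoreRow seats)).sum := by
    show d.values.foldl (fun t f => t + pvBScore f) (2 * (n - d.size))
        = 2 * (n - (d.keys.length : Int)) + (d.keys.map (pvScoreRow seats)).sum
    rw [PySem.List.foldl_add, hBsize, PySem.Dict.values_eq_map_keys d hBnd (true, true, true),
      List.map_map]
    refine congrArg (2 * (n - (d.keys.length : Int)) + ·) ?_
    refine congrArg List.sum (List.map_congr_left fun r _ => ?_)
    simp only [Function.comp_apply, hBget r, pvScoreRow]
  -- A's sorted list
  set ss := @PySem.List.sorted (List Int) (List Int) LinearOrder.toPartialOrder.toLT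
      LinearOrder.toDecidableLT seats (fun x => x) false with hss
  have hperm : ss.Perm seats :=
    @PySem.List.sorted_perm (List Int) (List Int) LinearOrder.toPartialOrder.toLT
      LinearOrder.toDecidableLT seats (fun x => x) false
  have hmono : ss.Pairwise (fun a b => pvRowF a ≤ pvRowF b) := by
    refine (PySem.List.sorted_pairwise seats (fun x => x)).imp_of_mem ?_
    intro a b ha hb hle
    refine pvRow_le_of_le ?_ ?_ hle
    · exact List.ne_nil_of_length_pos (by have := hpre a (hperm.subset ha); omega)
    · exact List.ne_nil_of_length_pos (by have := hpre b (hperm.subset hb); omega)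
  have hmemss : ∀ r, r ∈ d.keys ↔ r ∈ ss.map pvRowF := by
    intro r
    rw [hBmem r, ← List.Perm.mem_iff (hperm.map pvRowF)]
  show pvARun n ss = maxNumberOfFamilies_alt n seats
  cases hc : ss with
  | nil =>
    have hseats : seats = [] := (List.Perm.nil_eq (hc ▸ hperm)).symm
    have hk0 : d.keys = [] := List.eq_nil_iff_forall_not_mem.mpr (fun r hr => by
      rw [hBmem r, hseats] at hr; simp at hr)
    rw [hBval, hk0]
    simp [pvARun]
    ring
  | cons s rest =>
    have hm1 : ∀ u ∈ rest, pvRowF s ≤ pvRowF u := (List.pairwise_cons.mp (hc ▸ hmono)).1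
    have hmr : rest.Pairwise (fun a b => pvRowF a ≤ pvRowF b) :=
      (List.pairwise_cons.mp (hc ▸ hmono)).2
    have hsmem : pvRowF s ∈ d.keys := by
      rw [hmemss, hc]; simp
    have hnd' : (d.keys.erase (pvRowF s)).Nodup := hBnd.erase _
    have hks' : ∀ r, r ∈ d.keys.erase (pvRowF s) ↔ (r ∈ rest.map pvRowF ∧ r ≠ pvRowF s) := by
      intro r
      rw [List.Nodup.mem_erase_iff hBnd, hmemss, hc]
      simp only [List.map_cons, List.mem_cons]
      constructor
      · rintro ⟨hne, hc | hm⟩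
        · exact absurd hc hne
        · exact ⟨hm, hne⟩
      · exact fun ⟨hm, hne⟩ => ⟨hne, Or.inr hm⟩
    have hrun : pvARun n (s :: rest)
        = (pvALoop rest (pvRowF s) (pvBUpd (pvColF s) (true, true, true)).1
            (pvBUpd (pvColF s) (true, true, true)).2.1 (pvBUpd (pvColF s) (true, true, true)).2.2
            0 0).1
          + (n - (pvALoop rest (pvRowF s) (pvBUpd (pvColF s) (true, true, true)).1
            (pvBUpd (pvColF s) (true, true, true)).2.1 (pvBUpd (pvColF s) (true, true, true)).2.2
            0 0).2) * 2 := by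
      simp only [pvARun]
      rw [show pvAUpd (PySem.List.pyGetD s 1 0) true true true
          = pvBUpd (pvColF s) (true, true, true) from pvAUpd_eq _ (true, true, true)]
      rfl
    rw [hrun, pvALoop_eq rest (pvRowF s) (pvBUpd (pvColF s) (true, true, true)) 0 0
      (d.keys.erase (pvRowF s)) hmr hm1 hnd' hks', hBval]
    have hgrp : pvBScore (pvFold (rest.filter (fun u => pvRowF u == pvRowF s))
        (pvBUpd (pvColF s) (true, true, true))) = pvScoreRow seats (pvRowF s) := by
      rw [← pvScoreRow_cons_self, ← hc]
      exact pvScoreRow_perm hperm _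
    have hmapeq : ((d.keys.erase (pvRowF s)).map (pvScoreRow rest)).sum
        = ((d.keys.erase (pvRowF s)).map (pvScoreRow seats)).sum := by
      refine congrArg List.sum (List.map_congr_left (fun r hr => ?_))
      have hne := ((hks' r).mp hr).2
      rw [← pvScoreRow_perm hperm r, hc, pvScoreRow_cons_ne s rest r (fun e => hne e.symm)]
    have hpermk : d.keys.Perm (pvRowF s :: d.keys.erase (pvRowF s)) :=
      List.perm_cons_erase hsmem
    have hsum : (d.keys.map (pvScoreRow seats)).sum
        = pvScoreRow seats (pvRowF s) + ((d.keys.erase (pvRowF s)).map (pvScoreRow seats)).sum := by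
      rw [(hpermk.map (pvScoreRow seats)).sum_eq, List.map_cons, List.sum_cons]
    have hlen : (d.keys.length : Int) = (d.keys.erase (pvRowF s)).length + 1 := by
      rw [hpermk.length_eq]; push_cast [List.length_cons]; ring
    rw [hgrp, hmapeq, hsum, hlen]
    ring
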